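-- pv_equiv track=rewrite | github.com/khuongvo2305/realestateslabel | test.py | getSurroundings
-- ===== SOURCE A (Python) =====
-- def get_direction(deep):
--     if(deep == 0):
--         return [[0,0]]
--     if(deep > 0):
--         lst = []
--         for x in range(-deep,deep+1):
--             for y in range(-deep,deep+1):
--                 if x == deep or y == deep or x == -deep or y == -deep:
--                     lst.append([x,y])
--         return lst
--
-- def getSurroundings(matrix,x,y,deep=5):
-- 	res = []
-- 	for direction in get_direction(deep):
-- 		cx = x + direction[0]*deep
-- 		cy = y + direction[1]*deep
-- 		if(cy >=0 and cy < len(matrix)):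
-- 			if(cx >=0 and cx < len(matrix[cy])):
-- 				res.append(matrix[cy][cx])
-- 	return res
-- ===== SOURCE B (Python) =====
-- def _cell(matrix, cx, cy):
--     # safe bounds-checked lookup; None when outside the grid
--     if 0 <= cy < len(matrix):
--         row = matrix[cy]
--         if 0 <= cx < len(row):
--             return row[cx]
--     return None
--
-- def getSurroundings(matrix, x, y, deep=5):
--     # Build the O(deep) list of absolute ring coordinates directly, then keep
--     # the in-bounds lookups (A scans the whole (2*deep+1)^2 square instead).
--     d2 = deep * deep
--     if deep == 0:
--         coords = [(x, y)]
--     else: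
--         col = [y + dy * deep for dy in range(-deep, deep + 1)]
--         coords = (
--             [(x - d2, cy) for cy in col]
--             + [(x + dx * deep, cy) for dx in range(-deep + 1, deep) for cy in (y - d2, y + d2)]
--             + [(x + d2, cy) for cy in col]
--         )
--     return [v for v in (_cell(matrix, cx, cy) for cx, cy in coords) if v is not None]
-- ===== Notes on version B (the rewrite author's own statement) =====
-- stated objective: faster
-- what changed: B builds the O(deep) list of absolute ring coordinates directly (left column, interior top/bottom pairs, right column) and collects values via a bounds-checked Option-style lookup filtered for hits, instead of A's O(deep^2) scan of the full square with an accumulator loop.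
import Mathlib
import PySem

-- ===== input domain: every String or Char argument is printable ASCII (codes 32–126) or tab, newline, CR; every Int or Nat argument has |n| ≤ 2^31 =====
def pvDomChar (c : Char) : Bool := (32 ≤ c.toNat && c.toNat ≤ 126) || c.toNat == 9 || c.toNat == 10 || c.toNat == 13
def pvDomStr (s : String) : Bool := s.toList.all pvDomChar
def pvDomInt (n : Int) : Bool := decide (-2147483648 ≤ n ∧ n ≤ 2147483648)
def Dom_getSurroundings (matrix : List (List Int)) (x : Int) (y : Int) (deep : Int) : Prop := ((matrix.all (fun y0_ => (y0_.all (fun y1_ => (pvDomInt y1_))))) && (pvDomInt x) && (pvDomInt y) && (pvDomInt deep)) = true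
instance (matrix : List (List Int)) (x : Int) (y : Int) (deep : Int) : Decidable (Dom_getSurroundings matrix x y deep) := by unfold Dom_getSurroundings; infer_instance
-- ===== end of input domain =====

-- B builds the O(deep) list of absolute ring coordinates directly and collects the
-- in-bounds values by a filtered optional lookup, instead of scanning the full square.

-- ===== PORT A =====
-- helper get_direction: nested scan over the full square keeping boundary cells.
-- (for deep < 0 Python returns None and getSurroundings raises — excluded by Pre_;
--  the port returns [] there, a value never claimed about)
def pvGetDirection (deep : Int) : List (List Int) :=
  if deep == 0 then [[0, 0]]
  else if deep > 0 then
    (PySem.List.pyRange (-deep) (deep + 1) 1).foldl (fun lst xv =>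
      (PySem.List.pyRange (-deep) (deep + 1) 1).foldl (fun lst2 yv =>
        if xv == deep || yv == deep || xv == -deep || yv == -deep then lst2 ++ [[xv, yv]]
        else lst2) lst) []
  else []

def getSurroundings (matrix : List (List Int)) (x : Int) (y : Int) (deep : Int) : List Int :=
  (pvGetDirection deep).foldl (fun res direction =>
    let cx := x + (PySem.List.pyGetD direction 0 0) * deep
    let cy := y + (PySem.List.pyGetD direction 1 0) * deep
    if 0 ≤ cy ∧ cy < (matrix.length : Int) then
      let row := PySem.List.pyGetD matrix cy []   -- cy is in range here, default never used
      if 0 ≤ cx ∧ cx < (row.length : Int) then res ++ [PySem.List.pyGetD row cx 0]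
      else res
    else res) []

-- ===== PORT B =====
-- bounds-checked lookup: Python's _cell, none when outside the grid
def pvCell (matrix : List (List Int)) (cx : Int) (cy : Int) : Option Int :=
  if 0 ≤ cy ∧ cy < (matrix.length : Int) then
    let row := matrix.getD cy.toNat []
    if 0 ≤ cx ∧ cx < (row.length : Int) then some (row.getD cx.toNat 0) else none
  else none

-- the O(deep) list of absolute ring coordinates, in A's visiting order
def pvRingCoords (x : Int) (y : Int) (deep : Int) : List (Int × Int) :=
  if deep == 0 then [(x, y)]
  else
    let d2 := deep * deep
    let col := (PySem.List.pyRange (-deep) (deep + 1) 1).map (fun dy => y + dy * deep)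
    (col.map (fun cy => (x - d2, cy)))
      ++ ((PySem.List.pyRange (-deep + 1) deep 1).flatMap
            (fun dx => [(x + dx * deep, y - d2), (x + dx * deep, y + d2)]))
      ++ (col.map (fun cy => (x + d2, cy)))

def getSurroundings_alt (matrix : List (List Int)) (x : Int) (y : Int) (deep : Int) : List Int :=
  (pvRingCoords x y deep).filterMap (fun c => pvCell matrix c.1 c.2)

-- ===== PRECONDITION & SPEC =====
-- Pre_ excludes deep < 0, where get_direction returns None and A raises TypeError.
def Pre_getSurroundings (matrix : List (List Int)) (x : Int) (y : Int) (deep : Int) : Prop :=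
  0 ≤ deep
instance (matrix : List (List Int)) (x : Int) (y : Int) (deep : Int) : Decidable (Pre_getSurroundings matrix x y deep) := by unfold Pre_getSurroundings; infer_instance

def pvWitness_getSurroundings : List (List Int) × Int × Int × Int := ([[1, 2], [3, 4]], 0, 0, 1)

def Spec_getSurroundings (matrix : List (List Int)) (x : Int) (y : Int) (deep : Int) (out : List Int) : Prop := out = getSurroundings_alt matrix x y deep
instance (matrix : List (List Int)) (x : Int) (y : Int) (deep : Int) (out : List Int) : Decidable (Spec_getSurroundings matrix x y deep out) := by unfold Spec_getSurroundings; infer_instance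

-- ===== CLAIM (what is proved, stated in full; the proofs are below) =====
def Claim_equal_getSurroundings : Prop := ∀ (matrix : List (List Int)) (x : Int) (y : Int) (deep : Int), Dom_getSurroundings matrix x y deep → Pre_getSurroundings matrix x y deep → Spec_getSurroundings matrix x y deep (getSurroundings matrix x y deep)

-- ===== LEMMAS AND PROOFS =====

-- proof-only helper: the ring of RELATIVE directions as (dx, dy) pairs
def pvRing (deep : Int) : List (Int × Int) :=
  if deep == 0 then [(0, 0)]
  else
    ((PySem.List.pyRange (-deep) (deep + 1) 1).map (fun dy => (-deep, dy)))
      ++ ((PySem.List.pyRange (-deep + 1) deep 1).flatMap (fun dx => [(dx, -deep), (dx, deep)]))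
      ++ ((PySem.List.pyRange (-deep) (deep + 1) 1).map (fun dy => (deep, dy)))

-- A's direction list, viewed as (dx, dy) pairs, is exactly the relative ring.
theorem pvMap_getDirection_eq_ring (deep : Int) (hd : 0 ≤ deep) :
    (pvGetDirection deep).map
      (fun d => (PySem.List.pyGetD d 0 0, PySem.List.pyGetD d 1 0)) = pvRing deep := by
  by_cases h0 : deep = 0
  · subst h0; decide
  have hpos : 0 < deep := lt_of_le_of_ne hd (Ne.symm h0)
  have hsplit : PySem.List.pyRange (-deep) (deep + 1) 1
      = [-deep] ++ PySem.List.pyRange (-deep + 1) deep 1 ++ [deep] := by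
    rw [PySem.List.pyRange_one_cons (by omega),
        PySem.List.pyRange_one_succ_right (by omega)]
    simp
  have hmemM : ∀ xv ∈ PySem.List.pyRange (-deep + 1) deep 1, -deep < xv ∧ xv < deep := by
    intro xv hxv
    have := (PySem.List.mem_pyRange_one).1 hxv
    omega
  -- reduce A's nested fold to a flatMap over the outer range
  have hA : pvGetDirection deep
      = (PySem.List.pyRange (-deep) (deep + 1) 1).flatMap (fun xv =>
          ((PySem.List.pyRange (-deep) (deep + 1) 1).filter
            (fun yv => xv == deep || yv == deep || xv == -deep || yv == -deep)).map
            (fun yv => [xv, yv])) := by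
    unfold pvGetDirection
    rw [if_neg (by simpa using h0), if_pos (by simpa using hpos)]
    refine (PySem.List.foldl_congr_mem _ _ (fun lst xv => lst ++
        ((PySem.List.pyRange (-deep) (deep + 1) 1).filter
          (fun yv => xv == deep || yv == deep || xv == -deep || yv == -deep)).map
          (fun yv => [xv, yv])) _ ?_).trans ?_
    · intro acc xv _
      exact PySem.List.foldl_append_if _ _ _ _
    · rw [PySem.List.foldl_append_eq_flatMap]
      simp
  rw [hA, List.map_flatMap]
  have hcomp : (PySem.List.pyRange (-deep) (deep + 1) 1).flatMap (fun xv =>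
        (((PySem.List.pyRange (-deep) (deep + 1) 1).filter
          (fun yv => xv == deep || yv == deep || xv == -deep || yv == -deep)).map
          (fun yv => [xv, yv])).map
          (fun d => (PySem.List.pyGetD d 0 0, PySem.List.pyGetD d 1 0)))
      = (PySem.List.pyRange (-deep) (deep + 1) 1).flatMap (fun xv =>
          ((PySem.List.pyRange (-deep) (deep + 1) 1).filter
            (fun yv => xv == deep || yv == deep || xv == -deep || yv == -deep)).map
            (fun yv => (xv, yv))) := by
    apply List.flatMap_congr
    intro xv _
    rw [List.map_map]
    apply List.map_congr_left
    intro yv _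
    simp [PySem.List.pyGetD, PySem.List.pyGet?, PySem.List.pyIdx?]
  rw [hcomp]
  unfold pvRing
  rw [if_neg (by simpa using h0)]
  rw [hsplit]
  rw [List.flatMap_append, List.flatMap_append]
  simp only [List.flatMap_singleton]
  congr 1
  · congr 1
    · -- xv = -deep column: the filter keeps everything
      rw [List.filter_eq_self.mpr (by intro yv _; simp)]
    · -- middle rows: the filter keeps only yv = ±deep
      apply List.flatMap_congr
      intro xv hxv
      obtain ⟨h1, h2⟩ := hmemM xv hxv
      have f2 : (PySem.List.pyRange (-deep + 1) deep 1).filter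
          (fun yv => xv == deep || yv == deep || xv == -deep || yv == -deep) = [] := by
        apply List.filter_eq_nil_iff.mpr
        intro yv hyv
        obtain ⟨g1, g2⟩ := hmemM yv hyv
        simp only [Bool.or_eq_true, beq_iff_eq]
        omega
      rw [List.filter_append, List.filter_append, f2]
      simp only [List.filter_cons, List.filter_nil]
      rw [if_pos (by simp), if_pos (by simp)]
      simp
  · -- xv = deep column: the filter keeps everything
    rw [List.filter_eq_self.mpr (by intro yv _; simp)]

-- B's absolute coordinate list is the relative ring mapped to absolute coordinates.
theorem pvRingCoords_eq_map_ring (x y deep : Int) :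
    pvRingCoords x y deep
      = (pvRing deep).map (fun d => (x + d.1 * deep, y + d.2 * deep)) := by
  unfold pvRingCoords pvRing
  by_cases h0 : deep = 0
  · subst h0; simp
  rw [if_neg (by simpa using h0), if_neg (by simpa using h0)]
  simp only [List.map_append, List.map_map, List.map_flatMap]
  congr 1
  congr 1
  · refine List.map_congr_left ?_
    intro dy _
    have h1 : x - deep * deep = x + -deep * deep := by ring
    simp [Function.comp, h1]
  · refine List.flatMap_congr ?_
    intro dx _
    have h1 : y - deep * deep = y + -deep * deep := by ring
    simp [h1]

-- a foldl that conditionally appends one hit is a filterMap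
theorem pvFoldl_option_append {α β : Type} (l : List α) (f : α → Option β) (init : List β) :
    l.foldl (fun res a => (f a).elim res (fun v => res ++ [v])) init
      = init ++ l.filterMap f := by
  induction l generalizing init with
  | nil => simp
  | cons a t ih =>
    simp only [List.foldl_cons, List.filterMap_cons]
    cases h : f a <;> simp [ih]

-- A's loop body at one cell equals the match on B's bounds-checked lookup
theorem pvBody_eq_cell (matrix : List (List Int)) (cx cy : Int) (res : List Int) :
    (if 0 ≤ cy ∧ cy < (matrix.length : Int) then
        let row := PySem.List.pyGetD matrix cy []
        if 0 ≤ cx ∧ cx < (row.length : Int) then res ++ [PySem.List.pyGetD row cx 0]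
        else res
      else res)
      = (pvCell matrix cx cy).elim res (fun v => res ++ [v]) := by
  unfold pvCell
  by_cases hy : 0 ≤ cy ∧ cy < (matrix.length : Int)
  · have hrow : PySem.List.pyGetD matrix cy [] = matrix.getD cy.toNat [] := by
      rw [PySem.List.pyGetD_eq_getElem matrix [] hy.1 hy.2]
      exact (List.getD_eq_getElem _ _ (by omega)).symm
    rw [hrow]
    by_cases hx : 0 ≤ cx ∧ cx < ((matrix.getD cy.toNat []).length : Int)
    · have hv : PySem.List.pyGetD (matrix.getD cy.toNat []) cx 0
          = (matrix.getD cy.toNat []).getD cx.toNat 0 := by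
        rw [PySem.List.pyGetD_eq_getElem _ 0 hx.1 hx.2]
        exact (List.getD_eq_getElem _ _ (by omega)).symm
      simp only [if_pos hy, if_pos hx, hv, Option.elim]
    · simp only [if_pos hy, if_neg hx, Option.elim]
  · simp only [if_neg hy, Option.elim]

-- ===== VERDICT (by name: the statement is the Claim_ definition above) =====
theorem getSurroundings_spec : Claim_equal_getSurroundings := by
  intro matrix x y deep _ hPre
  unfold Spec_getSurroundings getSurroundings getSurroundings_alt
  have hbody : (pvGetDirection deep).foldl (fun res direction =>
      let cx := x + (PySem.List.pyGetD direction 0 0) * deep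
      let cy := y + (PySem.List.pyGetD direction 1 0) * deep
      if 0 ≤ cy ∧ cy < (matrix.length : Int) then
        let row := PySem.List.pyGetD matrix cy []
        if 0 ≤ cx ∧ cx < (row.length : Int) then res ++ [PySem.List.pyGetD row cx 0]
        else res
      else res) []
      = (pvGetDirection deep).foldl (fun res direction =>
          (pvCell matrix (x + (PySem.List.pyGetD direction 0 0) * deep)
              (y + (PySem.List.pyGetD direction 1 0) * deep)).elim res
            (fun v => res ++ [v])) [] := by
    refine PySem.List.foldl_congr_mem _ _ _ _ ?_
    intro res direction _
    exact pvBody_eq_cell matrix _ _ res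
  rw [hbody, pvRingCoords_eq_map_ring, List.filterMap_map,
      ← pvMap_getDirection_eq_ring deep hPre, List.filterMap_map]
  exact (pvFoldl_option_append (pvGetDirection deep)
    (((fun c => pvCell matrix c.1 c.2) ∘ fun d => (x + d.1 * deep, y + d.2 * deep)) ∘ fun d =>
      (PySem.List.pyGetD d 0 0, PySem.List.pyGetD d 1 0)) []).trans (List.nil_append _)
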